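-- pv_equiv track=rewrite | github.com/Pavelx4y16/yandex_contest | tasks/task2/main.py | main_algo
-- ===== SOURCE A (Python) =====
-- STEP = 500
--
-- def main_algo(n, ratings):
--     bonuses = [STEP]
--     for i in range(1, n):
--         if ratings[i] > ratings[i-1]:
--             bonuses.append(bonuses[i-1] + STEP)
--         elif ratings[i] == ratings[i-1]:
--             bonuses.append(STEP)
--         else:
--             bonuses.append(STEP)
--             if bonuses[i-1] == STEP:
--                 j = i - 1
--                 while j >= 0 and ratings[j] > ratings[j+1]:
--                     bonuses[j] += STEP
--                     j -= 1
--
--     return sum(bonuses)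
-- ===== SOURCE B (Python) =====
-- STEP = 500
--
-- def _runs(r):
--     out = [1]
--     for prev, cur in zip(r, r[1:]):
--         out.append(out[-1] + 1 if cur > prev else 1)
--     return out
--
-- def main_algo(n, ratings):
--     if n <= 1:
--         return STEP
--     r = ratings[:n]
--     inc = _runs(r)
--     dec = _runs(r[::-1])[::-1]
--     total = 0
--     for v, d in zip(inc, dec):
--         if v == 1:
--             total += d
--         elif d == 1:
--             total += v
--         else:
--             total += v + d - 2
--     return STEP * total
-- ===== Notes on version B (the rewrite author's own statement) =====
-- stated objective: faster
-- what changed: A builds the bonus list with a backward re-bump loop inside the main loop (quadratic on descending runs); B computes rise-run and fall-run lengths in two linear passes and sums a closed per-position formula reproducing A's exact values.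
import Mathlib
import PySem

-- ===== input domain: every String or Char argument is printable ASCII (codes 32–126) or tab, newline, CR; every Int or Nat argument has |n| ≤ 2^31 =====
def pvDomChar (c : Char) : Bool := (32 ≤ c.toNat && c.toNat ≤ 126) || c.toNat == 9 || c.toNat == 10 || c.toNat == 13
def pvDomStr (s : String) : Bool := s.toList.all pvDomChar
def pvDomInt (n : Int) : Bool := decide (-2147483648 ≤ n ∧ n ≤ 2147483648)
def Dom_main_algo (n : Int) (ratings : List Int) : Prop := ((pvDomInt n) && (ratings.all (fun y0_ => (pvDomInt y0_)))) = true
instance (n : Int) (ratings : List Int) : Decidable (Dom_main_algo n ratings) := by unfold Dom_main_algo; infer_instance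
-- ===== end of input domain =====

-- B replaces A's quadratic back-propagation by two linear run-length passes (left-to-right
-- rise runs, right-to-left fall runs) combined by a closed per-position formula; objective: faster.

-- ===== PORT A =====
-- inner 'while j >= 0 and ratings[j] > ratings[j+1]' loop of A; the Nat argument k
-- encodes the loop variable as k = j + 1 (k = 0 is the 'j < 0' exit), so the
-- recursion is structural; the computation is the same step for step.
def pvAInner (ratings : List Int) : Nat → List Int → List Int
  | 0, bonuses => bonuses
  | j + 1, bonuses =>
    if PySem.List.pyGetD ratings (j : Int) 0 > PySem.List.pyGetD ratings ((j : Int) + 1) 0 then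
      pvAInner ratings j (bonuses.set j (PySem.List.pyGetD bonuses (j : Int) 0 + 500))
    else bonuses

def main_algo (n : Int) (ratings : List Int) : Int :=
  ((PySem.List.pyRange 1 n).foldl (fun bonuses i =>
    if PySem.List.pyGetD ratings i 0 > PySem.List.pyGetD ratings (i-1) 0 then
      bonuses ++ [PySem.List.pyGetD bonuses (i-1) 0 + 500]
    else if PySem.List.pyGetD ratings i 0 = PySem.List.pyGetD ratings (i-1) 0 then
      bonuses ++ [500]
    else
      let b2 := bonuses ++ [500]
      if PySem.List.pyGetD b2 (i-1) 0 = 500 then pvAInner ratings i.toNat b2 else b2) [500]).sum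

-- ===== PORT B =====
-- _runs(r): out = [1]; for prev, cur in zip(r, r[1:]): out.append(out[-1] + 1 if cur > prev else 1)
def pvRuns (r : List Int) : List Int :=
  (r.zip (PySem.List.slice r (some 1))).foldl
    (fun out pc => out ++ [if pc.2 > pc.1 then PySem.List.pyGetD out (-1) 0 + 1 else 1]) [1]

def main_algo_alt (n : Int) (ratings : List Int) : Int :=
  if n ≤ 1 then 500
  else
    let r := PySem.List.slice ratings none (some n)
    let inc := pvRuns r
    let dec := (pvRuns r.reverse).reverse   -- r[::-1] ported as List.reverse (exact)
    let total := (inc.zip dec).foldl (fun total vd =>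
      if vd.1 = 1 then total + vd.2
      else if vd.2 = 1 then total + vd.1
      else total + (vd.1 + vd.2 - 2)) 0
    500 * total

-- ===== PRECONDITION & SPEC =====
-- Pre_ excludes exactly the inputs where A raises IndexError: n ≥ 2 with fewer than n ratings.
def Pre_main_algo (n : Int) (ratings : List Int) : Prop :=
  n ≤ (ratings.length : Int) ∨ n ≤ 1
instance (n : Int) (ratings : List Int) : Decidable (Pre_main_algo n ratings) := by
  unfold Pre_main_algo; infer_instance

def pvWitness_main_algo : Int × List Int := (2, [3, 1])

def Spec_main_algo (n : Int) (ratings : List Int) (out : Int) : Prop := out = main_algo_alt n ratings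
instance (n : Int) (ratings : List Int) (out : Int) : Decidable (Spec_main_algo n ratings out) := by
  unfold Spec_main_algo; infer_instance

-- ===== CLAIM (what is proved, stated in full; the proofs are below) =====
def Claim_equal_main_algo : Prop := ∀ (n : Int) (ratings : List Int), Dom_main_algo n ratings → Pre_main_algo n ratings → Spec_main_algo n ratings (main_algo n ratings)

-- ===== LEMMAS AND PROOFS =====

-- index-based specification values (proof-only helpers)
def pvInc (r : List Int) : Nat → Int
  | 0 => 1
  | j + 1 => if r.getD (j + 1) 0 > r.getD j 0 then pvInc r j + 1 else 1

def pvD (r : List Int) (m : Nat) (j : Nat) : Int :=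
  if h : j + 1 < m ∧ r.getD j 0 > r.getD (j + 1) 0 then pvD r m (j + 1) + 1 else 1
termination_by m - j
decreasing_by omega

def pvVal (r : List Int) (m j : Nat) : Int :=
  if pvInc r j = 1 then pvD r m j
  else if pvD r m j = 1 then pvInc r j
  else pvInc r j + pvD r m j - 2

def pvChain (r : List Int) (j i : Nat) : Bool :=
  (List.range' j (i - j)).all (fun t => decide (r.getD t 0 > r.getD (t + 1) 0))

def pvBon (r : List Int) (i : Nat) : List Int :=
  (List.range (i + 1)).map (fun j => 500 * pvVal r (i + 1) j)

theorem pvChain_iff (r : List Int) (j i : Nat) :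
    pvChain r j i = true ↔ ∀ t, j ≤ t → t < i → r.getD t 0 > r.getD (t + 1) 0 := by
  unfold pvChain
  simp only [List.all_eq_true, List.mem_range'_1, decide_eq_true_eq]
  constructor
  · intro h t ht hti
    exact h t ⟨ht, by omega⟩
  · rintro h t ⟨ht, hti⟩
    exact h t ht (by omega)

theorem pvInc_pos (r : List Int) (j : Nat) : 1 ≤ pvInc r j := by
  cases j with
  | zero => simp [pvInc]
  | succ j =>
    rw [pvInc]
    split
    · have := pvInc_pos r j; omega
    · omega

theorem pvD_pos (r : List Int) (m j : Nat) : 1 ≤ pvD r m j := by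
  rw [pvD]
  split
  · have := pvD_pos r m (j + 1); omega
  · omega
termination_by m - j
decreasing_by omega

theorem pvD_last (r : List Int) (m j : Nat) (h : m ≤ j + 1) : pvD r m j = 1 := by
  rw [pvD]
  split
  · omega
  · rfl

theorem pvVal_last (r : List Int) (j : Nat) : pvVal r (j + 1) j = pvInc r j := by
  unfold pvVal
  rw [pvD_last r (j + 1) j (le_refl _)]
  split <;> simp_all

theorem pvD_run (r : List Int) (m t : Nat) (ht : t < m)
    (hc : ∀ u, t ≤ u → u + 1 < m → r.getD u 0 > r.getD (u + 1) 0) :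
    pvD r m t = ((m - t : Nat) : Int) := by
  rw [pvD]
  by_cases h : t + 1 < m
  · rw [dif_pos ⟨h, hc t le_rfl h⟩,
      pvD_run r m (t + 1) h (fun u hu => hc u (by omega))]
    omega
  · rw [dif_neg (by omega)]
    have : m - t = 1 := by omega
    rw [this]
    rfl
termination_by m - t
decreasing_by omega

theorem pvD_chain (r : List Int) (i t : Nat) (ht : t < i)
    (hc : ∀ u, t ≤ u → u < i → r.getD u 0 > r.getD (u + 1) 0) :
    pvD r i t = ((i - t : Nat) : Int) :=
  pvD_run r i t ht (fun u hu h1 => hc u hu (by omega))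

theorem pvD_succ_chain (r : List Int) (i t : Nat) (ht : t < i)
    (hc : ∀ u, t ≤ u → u < i → r.getD u 0 > r.getD (u + 1) 0) :
    pvD r (i + 1) t = pvD r i t + 1 := by
  rw [pvD_chain r i t ht hc,
    pvD_run r (i + 1) t (by omega) (fun u hu h1 => hc u hu (by omega))]
  omega

theorem pvD_succ_nochain (r : List Int) (i t : Nat) (ht : t < i)
    (hc : ¬ ∀ u, t ≤ u → u < i → r.getD u 0 > r.getD (u + 1) 0) :
    pvD r (i + 1) t = pvD r i t := by
  by_cases hgt : r.getD t 0 > r.getD (t + 1) 0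
  · have hti : t + 1 < i := by
      by_contra hle
      exact hc (fun u hu hui => by
        have : u = t := by omega
        rwa [this])
    rw [pvD, dif_pos ⟨by omega, hgt⟩]
    conv_rhs => rw [pvD]
    rw [dif_pos ⟨hti, hgt⟩,
      pvD_succ_nochain r i (t + 1) hti (fun hch => hc (fun u hu hui => by
        rcases Nat.eq_or_lt_of_le hu with h | h
        · rwa [← h]
        · exact hch u (by omega) hui))]
  · rw [pvD, dif_neg (fun hh => hgt hh.2), pvD, dif_neg (fun hh => hgt hh.2)]
termination_by i - t
decreasing_by omega

theorem pv_set_map_range {L k : Nat} (f : Nat → Int) (v : Int) :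
    ((List.range L).map f).set k v = (List.range L).map (fun t => if t = k then v else f t) := by
  apply List.ext_getElem
  · simp
  · intro i h1 h2
    simp only [List.getElem_set, List.getElem_map, List.getElem_range]
    simp only [List.length_set, List.length_map, List.length_range] at h1
    split
    · simp_all
    · rw [if_neg (by omega)]

theorem pvChain_single (r : List Int) (i : Nat) :
    pvChain r i (i + 1) = true ↔ r.getD i 0 > r.getD (i + 1) 0 := by
  rw [pvChain_iff]
  constructor
  · intro h
    exact h i le_rfl (by omega)
  · intro h t ht hti
    have : t = i := by omega
    rwa [this]

theorem pvChain_split (r : List Int) (t i : Nat) (h : t ≤ i) :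
    pvChain r t (i + 1) = true ↔
      (pvChain r t i = true ∧ r.getD i 0 > r.getD (i + 1) 0) := by
  rw [pvChain_iff, pvChain_iff]
  constructor
  · intro h'
    exact ⟨fun u hu hui => h' u hu (by omega), h' i h (by omega)⟩
  · rintro ⟨h1, h2⟩ u hu hui
    by_cases he : u = i
    · rwa [he]
    · exact h1 u hu (by omega)

theorem pv_getD_map_range {L : Nat} (f : Nat → Int) (t : Nat) (h : t < L) :
    ((List.range L).map f).getD t 0 = f t := by
  rw [List.getD_eq_getElem _ _ (by simpa using h)]
  simp

-- the inner while loop bumps by 500 exactly the positions t ≤ j from which ratings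
-- strictly descend through position j + 1
theorem pv_inner_spec (r : List Int) (L : Nat) :
    ∀ (j : Nat) (f : Nat → Int), j < L →
    pvAInner r (j + 1) ((List.range L).map f)
      = (List.range L).map
          (fun t => if t ≤ j ∧ pvChain r t (j + 1) = true then f t + 500 else f t) := by
  intro j
  induction j with
  | zero =>
    intro f hL
    rw [pvAInner]
    rw [show PySem.List.pyGetD r ((0 : Nat) : Int) 0 = r.getD 0 0 from
        PySem.List.pyGetD_natCast r 0 0,
      show PySem.List.pyGetD r (((0 : Nat) : Int) + 1) 0 = r.getD 1 0 from by
        rw [show ((0 : Nat) : Int) + 1 = ((1 : Nat) : Int) by omega,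
          PySem.List.pyGetD_natCast]]
    by_cases hg : r.getD 0 0 > r.getD 1 0
    · rw [if_pos hg, pvAInner,
        show PySem.List.pyGetD ((List.range L).map f) ((0 : Nat) : Int) 0 = f 0 from by
          rw [PySem.List.pyGetD_natCast]; exact pv_getD_map_range f 0 hL,
        pv_set_map_range]
      apply List.map_congr_left
      intro t ht
      by_cases h0 : t = 0
      · rw [if_pos h0, h0,
          if_pos ⟨le_rfl, (pvChain_single r 0).mpr hg⟩]
      · rw [if_neg h0, if_neg (fun hh => h0 (by omega))]
    · rw [if_neg hg]
      apply Eq.symm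
      apply List.map_congr_left
      intro t ht
      split_ifs with h
      · exfalso
        have ht0 : t = 0 := by omega
        rw [ht0] at h
        exact hg ((pvChain_single r 0).mp h.2)
      · rfl
  | succ j ih =>
    intro f hL
    rw [pvAInner]
    rw [show PySem.List.pyGetD r ((j + 1 : Nat) : Int) 0 = r.getD (j + 1) 0 from
        PySem.List.pyGetD_natCast r (j + 1) 0,
      show PySem.List.pyGetD r (((j + 1 : Nat) : Int) + 1) 0 = r.getD (j + 2) 0 from by
        rw [show ((j + 1 : Nat) : Int) + 1 = ((j + 2 : Nat) : Int) by omega,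
          PySem.List.pyGetD_natCast]]
    by_cases hg : r.getD (j + 1) 0 > r.getD (j + 2) 0
    · rw [if_pos hg,
        show PySem.List.pyGetD ((List.range L).map f) ((j + 1 : Nat) : Int) 0 = f (j + 1) from by
          rw [PySem.List.pyGetD_natCast]; exact pv_getD_map_range f (j + 1) hL,
        pv_set_map_range, ih _ (by omega)]
      apply List.map_congr_left
      intro t ht
      by_cases h0 : t = j + 1
      · subst h0
        rw [if_neg (fun hh : _ ∧ _ => by omega), if_pos rfl,
          if_pos ⟨le_rfl, (pvChain_single r (j + 1)).mpr hg⟩]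
      · have hf' : (if t = j + 1 then f (j + 1) + 500 else f t) = f t := if_neg h0
        rw [hf']
        by_cases hle : t ≤ j
        · by_cases hc : pvChain r t (j + 1) = true
          · rw [if_pos ⟨hle, hc⟩,
              if_pos ⟨by omega, (pvChain_split r t (j + 1) (by omega)).mpr ⟨hc, hg⟩⟩]
          · rw [if_neg (fun hh => hc hh.2),
              if_neg (fun hh => hc ((pvChain_split r t (j + 1) (by omega)).mp hh.2).1)]
        · rw [if_neg (fun hh => hle hh.1), if_neg (fun hh : _ ∧ _ => by omega)]
    · rw [if_neg hg]
      apply Eq.symm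
      apply List.map_congr_left
      intro t ht
      split_ifs with h
      · exact absurd ((pvChain_split r t (j + 1) h.1).mp h.2).2 hg
      · rfl

theorem pv_val_nochain (r : List Int) (i t : Nat) (ht : t < i)
    (hnc : ¬ ∀ u, t ≤ u → u < i → r.getD u 0 > r.getD (u + 1) 0) :
    pvVal r (i + 1) t = pvVal r i t := by
  unfold pvVal
  rw [pvD_succ_nochain r i t ht hnc]

theorem pv_val_stable (r : List Int) (i t : Nat) (h1 : 1 ≤ i) (ht : t < i)
    (h : ¬ r.getD (i - 1) 0 > r.getD i 0) :
    pvVal r (i + 1) t = pvVal r i t := by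
  apply pv_val_nochain r i t ht
  intro hch
  have hh := hch (i - 1) (by omega) (by omega)
  rw [show i - 1 + 1 = i by omega] at hh
  exact h hh

theorem pv_val_bump (r : List Int) (i t : Nat) (h1 : 1 ≤ i) (ht : t < i)
    (hch : ∀ u, t ≤ u → u < i → r.getD u 0 > r.getD (u + 1) 0)
    (hI : pvInc r (i - 1) = 1) :
    pvVal r (i + 1) t = pvVal r i t + 1 := by
  have hsucc := pvD_succ_chain r i t ht hch
  have hDi := pvD_chain r i t ht hch
  by_cases hinct : pvInc r t = 1
  · rw [pvVal, pvVal, if_pos hinct, if_pos hinct, hsucc]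
  · have htne : t ≠ i - 1 := fun he => hinct (he ▸ hI)
    have hge : (2 : Int) ≤ pvD r i t := by
      rw [hDi]
      have : 2 ≤ i - t := by omega
      omega
    rw [pvVal, pvVal, if_neg hinct, if_neg hinct, hsucc,
      if_neg (by omega), if_neg (by omega)]
    ring

theorem pv_val_peak (r : List Int) (i t : Nat) (h1 : 1 ≤ i) (ht : t < i)
    (hch : ∀ u, t ≤ u → u < i → r.getD u 0 > r.getD (u + 1) 0)
    (hI : pvInc r (i - 1) ≠ 1) :
    pvVal r (i + 1) t = pvVal r i t := by
  have hti : t = i - 1 := by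
    by_contra hne
    have h2 : 2 ≤ i := by omega
    have hdesc := hch (i - 2) (by omega) (by omega)
    rw [show i - 2 + 1 = i - 1 by omega] at hdesc
    apply hI
    obtain ⟨k, hk⟩ : ∃ k, i - 1 = k + 1 := ⟨i - 2, by omega⟩
    have hdesc' : r.getD k 0 > r.getD (k + 1) 0 := by
      rw [show k = i - 2 by omega, show i - 2 + 1 = i - 1 by omega]
      exact hdesc
    rw [hk, pvInc, if_neg (lt_asymm hdesc')]
  subst hti
  have hD1 : pvD r i (i - 1) = 1 := pvD_last r i (i - 1) (by omega)
  have hD2 : pvD r (i + 1) (i - 1) = 2 := by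
    rw [pvD_succ_chain r i (i - 1) (by omega) hch, hD1]
    norm_num
  rw [pvVal, pvVal, if_neg hI, if_neg hI, hD1, hD2,
    if_neg (by norm_num), if_pos rfl]
  ring

-- one iteration of A's main loop, on the invariant state
theorem pv_step (ratings : List Int) (i : Nat) (h1 : 1 ≤ i) (hi : i < ratings.length) :
    (fun bonuses (k : Int) =>
      if PySem.List.pyGetD ratings k 0 > PySem.List.pyGetD ratings (k - 1) 0 then
        bonuses ++ [PySem.List.pyGetD bonuses (k - 1) 0 + 500]
      else if PySem.List.pyGetD ratings k 0 = PySem.List.pyGetD ratings (k - 1) 0 then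
        bonuses ++ [500]
      else
        let b2 := bonuses ++ [500]
        if PySem.List.pyGetD b2 (k - 1) 0 = 500 then pvAInner ratings k.toNat b2 else b2)
      (pvBon ratings (i - 1)) (i : Int) = pvBon ratings i := by
  have hi1 : i - 1 + 1 = i := by omega
  have hc1 : PySem.List.pyGetD ratings (i : Int) 0 = ratings.getD i 0 :=
    PySem.List.pyGetD_natCast ratings i 0
  have hc2 : (i : Int) - 1 = ((i - 1 : Nat) : Int) := by omega
  have hFm : pvBon ratings (i - 1)
      = (List.range i).map (fun j => 500 * pvVal ratings i j) := by
    unfold pvBon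
    rw [hi1]
  have hvlast : pvVal ratings i (i - 1) = pvInc ratings (i - 1) := by
    have := pvVal_last ratings (i - 1)
    rwa [hi1] at this
  have hgetb : PySem.List.pyGetD (pvBon ratings (i - 1)) ((i - 1 : Nat) : Int) 0
      = 500 * pvInc ratings (i - 1) := by
    rw [PySem.List.pyGetD_natCast, hFm, pv_getD_map_range _ _ (by omega), hvlast]
  have hvi : pvVal ratings (i + 1) i = pvInc ratings i := pvVal_last ratings i
  have hIncEq : pvInc ratings i
      = if ratings.getD i 0 > ratings.getD (i - 1) 0 then pvInc ratings (i - 1) + 1 else 1 := by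
    obtain ⟨k, hk⟩ : ∃ k, i = k + 1 := ⟨i - 1, by omega⟩
    subst hk
    rw [pvInc]
    simp
  simp only []
  rw [hc1, hc2, PySem.List.pyGetD_natCast]
  by_cases hgt : ratings.getD i 0 > ratings.getD (i - 1) 0
  · rw [if_pos hgt, hgetb, hFm]
    unfold pvBon
    rw [List.range_succ, List.map_append, List.map_singleton]
    congr 1
    · apply List.map_congr_left
      intro t ht
      rw [pv_val_stable ratings i t h1 (List.mem_range.mp ht) (lt_asymm hgt)]
    · rw [hvi, hIncEq, if_pos hgt]
      simp only [List.cons.injEq, and_true]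
      ring
  · rw [if_neg hgt]
    by_cases heq : ratings.getD i 0 = ratings.getD (i - 1) 0
    · rw [if_pos heq, hFm]
      unfold pvBon
      rw [List.range_succ, List.map_append, List.map_singleton]
      congr 1
      · apply List.map_congr_left
        intro t ht
        rw [pv_val_stable ratings i t h1 (List.mem_range.mp ht) (heq ▸ lt_irrefl _)]
      · rw [hvi, hIncEq, if_neg hgt]
        norm_num
    · rw [if_neg heq]
      have hb2 : pvBon ratings (i - 1) ++ [(500 : Int)]
          = (List.range (i + 1)).map
              (fun t => if t = i then 500 else 500 * pvVal ratings i t) := by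
        rw [hFm, List.range_succ, List.map_append, List.map_singleton, if_pos rfl]
        congr 1
        apply List.map_congr_left
        intro t ht
        rw [if_neg (by have := List.mem_range.mp ht; omega)]
      have hgetb2 : PySem.List.pyGetD (pvBon ratings (i - 1) ++ [(500 : Int)]) ((i - 1 : Nat) : Int) 0
          = 500 * pvInc ratings (i - 1) := by
        rw [hb2, PySem.List.pyGetD_natCast, pv_getD_map_range _ _ (by omega),
          if_neg (by omega), hvlast]
      have hipos := pvInc_pos ratings (i - 1)
      by_cases hI : pvInc ratings (i - 1) = 1
      · rw [hgetb2, if_pos (by rw [hI]; ring), hb2, Int.toNat_natCast]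
        have hinner := pv_inner_spec ratings (i + 1) (i - 1)
          (fun t => if t = i then 500 else 500 * pvVal ratings i t) (by omega)
        rw [hi1] at hinner
        rw [hinner]
        unfold pvBon
        apply List.map_congr_left
        intro t ht
        have htlt : t < i + 1 := List.mem_range.mp ht
        beta_reduce
        by_cases h0 : t = i
        · rw [if_neg (fun hh : _ ∧ _ => by omega), if_pos h0, h0, hvi, hIncEq, if_neg hgt]
          norm_num
        · have htl : t < i := by omega
          rw [show (if t = i then (500 : Int) else 500 * pvVal ratings i t)
              = 500 * pvVal ratings i t from if_neg h0]
          by_cases hch : pvChain ratings t i = true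
          · rw [if_pos ⟨by omega, hch⟩,
              pv_val_bump ratings i t h1 htl ((pvChain_iff ratings t i).mp hch) hI]
            ring
          · rw [if_neg (fun hh => hch hh.2),
              pv_val_nochain ratings i t htl
                (fun hp => hch ((pvChain_iff ratings t i).mpr hp))]
      · rw [hgetb2, if_neg (by omega), hb2]
        unfold pvBon
        apply List.map_congr_left
        intro t ht
        have htlt : t < i + 1 := List.mem_range.mp ht
        by_cases h0 : t = i
        · rw [if_pos h0, h0, hvi, hIncEq, if_neg hgt]
          norm_num
        · have htl : t < i := by omega
          rw [if_neg h0]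
          by_cases hch : pvChain ratings t i = true
          · rw [pv_val_peak ratings i t h1 htl ((pvChain_iff ratings t i).mp hch) hI]
          · rw [pv_val_nochain ratings i t htl
              (fun hp => hch ((pvChain_iff ratings t i).mpr hp))]

theorem pv_fold (ratings : List Int) (N : Nat) (h1 : 1 ≤ N) (hN : N ≤ ratings.length) :
    (PySem.List.pyRange 1 (N : Int)).foldl (fun bonuses i =>
      if PySem.List.pyGetD ratings i 0 > PySem.List.pyGetD ratings (i - 1) 0 then
        bonuses ++ [PySem.List.pyGetD bonuses (i - 1) 0 + 500]
      else if PySem.List.pyGetD ratings i 0 = PySem.List.pyGetD ratings (i - 1) 0 then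
        bonuses ++ [500]
      else
        let b2 := bonuses ++ [500]
        if PySem.List.pyGetD b2 (i - 1) 0 = 500 then pvAInner ratings i.toNat b2 else b2) [500]
    = pvBon ratings (N - 1) := by
  induction N with
  | zero => omega
  | succ N ih =>
    by_cases hN1 : 1 ≤ N
    · have hr : PySem.List.pyRange 1 ((N + 1 : Nat) : Int)
          = PySem.List.pyRange 1 (N : Int) ++ [(N : Int)] := by
        rw [show ((N + 1 : Nat) : Int) = (N : Int) + 1 by omega]
        exact PySem.List.pyRange_one_succ_right (by omega)
      rw [hr, List.foldl_append, ih hN1 (by omega), List.foldl_cons, List.foldl_nil,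
        show N + 1 - 1 = N from rfl]
      exact pv_step ratings N hN1 (by omega)
    · have hN0 : N = 0 := by omega
      subst hN0
      have hr : PySem.List.pyRange 1 ((1 : Nat) : Int) = [] := by
        simp [PySem.List.pyRange]
      rw [hr, List.foldl_nil]
      unfold pvBon
      have : pvVal ratings (0 + 1) 0 = 1 := by
        rw [pvVal, show pvInc ratings 0 = 1 from rfl, if_pos rfl,
          pvD_last ratings 1 0 le_rfl]
      simp [this]

theorem pv_A_eval (n : Int) (ratings : List Int) (h2 : 2 ≤ n) (hlen : n ≤ (ratings.length : Int)) :
    main_algo n ratings = ((List.range n.toNat).map (fun j => 500 * pvVal ratings n.toNat j)).sum := by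
  unfold main_algo
  rw [show n = ((n.toNat : Nat) : Int) by omega,
    pv_fold ratings n.toNat (by omega) (by omega)]
  unfold pvBon
  rw [show n.toNat - 1 + 1 = n.toNat by omega, Int.toNat_natCast]

theorem pv_getD_take (r : List Int) (m t : Nat) (h : t < m) :
    (r.take m).getD t 0 = r.getD t 0 := by
  simp [List.getD, h]

theorem pv_getD_reverse (r : List Int) (j : Nat) (hj : j < r.length) :
    r.reverse.getD j 0 = r.getD (r.length - 1 - j) 0 := by
  have h1 : j < r.reverse.length := by simpa using hj
  have h2 : r.length - 1 - j < r.length := by omega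
  rw [List.getD_eq_getElem _ _ h1, List.getD_eq_getElem _ _ h2, List.getElem_reverse]

theorem pv_runs_aux (r : List Int) (t : Nat) (ht : t < r.length) :
    ((r.drop t).zip (r.drop (t + 1))).foldl
      (fun out pc => out ++ [if pc.2 > pc.1 then PySem.List.pyGetD out (-1) 0 + 1 else 1])
      ((List.range (t + 1)).map (pvInc r))
    = (List.range r.length).map (pvInc r) := by
  by_cases h : t + 1 < r.length
  · have e1 : r.drop t = r[t] :: r.drop (t + 1) := List.drop_eq_getElem_cons ht
    have e2 : r.drop (t + 1) = r[t + 1] :: r.drop (t + 1 + 1) := List.drop_eq_getElem_cons h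
    have hz : (r.drop t).zip (r.drop (t + 1))
        = (r[t], r[t + 1]) :: ((r.drop (t + 1)).zip (r.drop (t + 1 + 1))) := by
      rw [e1, e2, List.zip_cons_cons]
    have hlast : PySem.List.pyGetD ((List.range (t + 1)).map (pvInc r)) (-1) 0 = pvInc r t := by
      rw [List.range_succ, List.map_append]
      simp [PySem.List.pyGetD, PySem.List.pyGet?, PySem.List.pyIdx?, List.getElem?_append]
    have hstep : ((List.range (t + 1)).map (pvInc r)) ++
        [if r[t + 1] > r[t] then PySem.List.pyGetD ((List.range (t + 1)).map (pvInc r)) (-1) 0 + 1 else 1]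
        = (List.range (t + 1 + 1)).map (pvInc r) := by
      rw [hlast]
      have hv : pvInc r (t + 1) = if r[t + 1] > r[t] then pvInc r t + 1 else 1 := by
        rw [pvInc, List.getD_eq_getElem _ _ h, List.getD_eq_getElem _ _ ht]
      rw [show List.range (t + 1 + 1) = List.range (t + 1) ++ [t + 1] from List.range_succ,
        List.map_append, List.map_singleton, hv]
    rw [hz, List.foldl_cons, hstep]
    exact pv_runs_aux r (t + 1) h
  · have hd : r.drop (t + 1) = [] := List.drop_eq_nil_of_le (by omega)
    rw [hd, List.zip_nil_right, List.foldl_nil]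
    have : t + 1 = r.length := by omega
    rw [this]
termination_by r.length - t
decreasing_by omega

theorem pv_runs_eval (r : List Int) (h : r ≠ []) :
    pvRuns r = (List.range r.length).map (pvInc r) := by
  unfold pvRuns
  rw [PySem.List.slice_from r (by omega : (0:Int) ≤ 1)]
  have h0 : 0 < r.length := List.length_pos_iff.mpr h
  have h1 : [(1:Int)] = (List.range 1).map (pvInc r) := by simp [pvInc]
  rw [h1, show r.drop (1:Int).toNat = r.drop (0 + 1) from rfl,
    show (r.zip (r.drop (0 + 1))) = ((r.drop 0).zip (r.drop (0 + 1))) by rw [List.drop_zero]]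
  exact pv_runs_aux r 0 h0

theorem pv_inc_reverse (r : List Int) (j : Nat) (hj : j < r.length) :
    pvInc r.reverse j = pvD r r.length (r.length - 1 - j) := by
  induction j with
  | zero =>
    rw [show pvInc r.reverse 0 = 1 from rfl, pvD_last r r.length (r.length - 1 - 0) (by omega)]
  | succ j ih =>
    have hjl : j < r.length := by omega
    have hrev1 : r.reverse.getD (j + 1) 0 = r.getD (r.length - 1 - (j + 1)) 0 :=
      pv_getD_reverse r (j + 1) (by omega)
    have hrev0 : r.reverse.getD j 0 = r.getD (r.length - 1 - (j + 1) + 1) 0 := by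
      rw [pv_getD_reverse r j hjl, show r.length - 1 - (j + 1) + 1 = r.length - 1 - j by omega]
    have hk1 : r.length - 1 - (j + 1) + 1 < r.length := by omega
    rw [pvInc, hrev1, hrev0, pvD]
    by_cases hg : r.getD (r.length - 1 - (j + 1)) 0 > r.getD (r.length - 1 - (j + 1) + 1) 0
    · rw [if_pos hg, dif_pos ⟨hk1, hg⟩, ih hjl,
        show r.length - 1 - j = r.length - 1 - (j + 1) + 1 by omega]
    · rw [if_neg hg, dif_neg (fun hh => hg hh.2)]

theorem pv_take_inc (r : List Int) (m j : Nat) (hj : j < m) :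
    pvInc (r.take m) j = pvInc r j := by
  induction j with
  | zero => rfl
  | succ j ih =>
    rw [pvInc, pvInc, pv_getD_take r m (j + 1) hj, pv_getD_take r m j (by omega),
      ih (by omega)]

theorem pv_take_D (r : List Int) (m j : Nat) :
    pvD (r.take m) m j = pvD r m j := by
  conv_lhs => rw [pvD]
  conv_rhs => rw [pvD]
  by_cases h : j + 1 < m
  · rw [pv_getD_take r m j (by omega), pv_getD_take r m (j + 1) h]
    by_cases hg : r.getD j 0 > r.getD (j + 1) 0
    · rw [dif_pos ⟨h, hg⟩, dif_pos ⟨h, hg⟩, pv_take_D r m (j + 1)]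
    · rw [dif_neg (fun hh => hg hh.2), dif_neg (fun hh => hg hh.2)]
  · rw [dif_neg (fun hh => absurd hh.1 h), dif_neg (fun hh => absurd hh.1 h)]
termination_by m - j
decreasing_by omega

theorem pv_B_eval (n : Int) (ratings : List Int) (h2 : 2 ≤ n) (hlen : n ≤ (ratings.length : Int)) :
    main_algo_alt n ratings
      = 500 * ((List.range n.toNat).map (fun j => pvVal (ratings.take n.toNat) n.toNat j)).sum := by
  have hsl : PySem.List.slice ratings none (some n) = ratings.take n.toNat :=
    PySem.List.slice_to ratings (by omega)
  unfold main_algo_alt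
  rw [if_neg (show ¬ n ≤ 1 by omega)]
  simp only [hsl]
  have hmm : 2 ≤ n.toNat := by omega
  have hlen' : (ratings.take n.toNat).length = n.toNat := by
    rw [List.length_take]; omega
  have hne : ratings.take n.toNat ≠ [] := by
    intro hh
    rw [hh] at hlen'
    simp at hlen'
    omega
  have hrevne : (ratings.take n.toNat).reverse ≠ [] := by simpa using hne
  have hrl : (ratings.take n.toNat).reverse.length = n.toNat := by simpa using hlen'
  rw [pv_runs_eval _ hne, hlen', pv_runs_eval _ hrevne, hrl]
  have hdec : ((List.range n.toNat).map (pvInc (ratings.take n.toNat).reverse)).reverse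
      = (List.range n.toNat).map (fun j => pvD (ratings.take n.toNat) n.toNat j) := by
    apply List.ext_getElem
    · simp
    · intro i h1 h2
      have hi : i < n.toNat := by simpa using h2
      rw [List.getElem_reverse]
      simp only [List.getElem_map, List.getElem_range, List.length_map, List.length_range]
      rw [pv_inc_reverse (ratings.take n.toNat) _ (by omega)]
      rw [hlen', show n.toNat - 1 - (n.toNat - 1 - i) = i by omega]
  rw [hdec, List.zip_map']
  have hbody : (fun (total : Int) (vd : Int × Int) =>
        if vd.1 = 1 then total + vd.2
        else if vd.2 = 1 then total + vd.1
        else total + (vd.1 + vd.2 - 2))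
      = fun total vd => total +
          (if vd.1 = 1 then vd.2 else if vd.2 = 1 then vd.1 else vd.1 + vd.2 - 2) := by
    funext a x
    split_ifs <;> rfl
  rw [hbody, PySem.List.foldl_add, List.map_map, zero_add]
  apply congrArg
  apply congrArg
  apply List.map_congr_left
  intro j hj
  simp only [Function.comp_apply]
  rfl

-- ===== VERDICT (by name: the statement is the Claim_ definition above) =====
theorem main_algo_spec : Claim_equal_main_algo := by
  intro n ratings _ hpre
  unfold Spec_main_algo
  by_cases h1 : n ≤ 1
  · -- range(1, n) is empty: A returns sum([500]) = 500; B returns 500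
    unfold main_algo main_algo_alt
    have hr : PySem.List.pyRange 1 n = [] := by simp [PySem.List.pyRange]; omega
    rw [hr, if_pos h1]
    simp
  · have h2 : 2 ≤ n := by omega
    have hlen : n ≤ (ratings.length : Int) := by
      unfold Pre_main_algo at hpre; omega
    rw [pv_A_eval n ratings h2 hlen, pv_B_eval n ratings h2 hlen,
      ← PySem.List.sum_map_const_mul_int]
    apply congrArg
    apply List.map_congr_left
    intro j hj
    have hjm : j < n.toNat := List.mem_range.mp hj
    unfold pvVal
    rw [pv_take_inc ratings n.toNat j hjm, pv_take_D ratings n.toNat j]
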